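-- pv_equiv track=rewrite | github.com/Kostiantyn-Liapkalo/Python_cheat_sheet | Functions/pressing_button.py | sequence_buttons
-- ===== SOURCE A (Python) =====
-- def sequence_buttons(string):
--
--     buttons = {
--         1: ".,?!:",
--         2: "ABC",
--         3: "DEF",
--         4: "GHI",
--         5: "JKL",
--         6: "MNO",
--         7: "PQRS",
--         8: "TUV",
--         9: "WXYZ",
--         0: " "
--     }
--
--     fin_str = ""
--
--     for ch in string.upper():
--         for key, value in buttons.items():
--             if ch in value:
--                 fin_str += str(key) * (value.find(ch) + 1)
--
--     return fin_str
-- ===== SOURCE B (Python) =====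
-- def sequence_buttons(string):
--     out = []
--     for ch in string.upper():
--         o = ord(ch)
--         if 65 <= o <= 90:
--             i = o - 65
--             if i < 15:                       # A..O: regular 3-letter keys 2..6
--                 out.append(str(2 + i // 3) * (i % 3 + 1))
--             elif i < 19:                     # PQRS on key 7
--                 out.append("7" * (i - 14))
--             elif i < 22:                     # TUV on key 8
--                 out.append("8" * (i - 18))
--             else:                            # WXYZ on key 9
--                 out.append("9" * (i - 21))
--         elif ch == " ":
--             out.append("0")
--         else:
--             j = ".,?!:".find(ch)
--             if j >= 0:
--                 out.append("1" * (j + 1))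
--     return "".join(out)
-- ===== Notes on version B (the rewrite author's own statement) =====
-- stated objective: faster
-- what changed: B drops the keypad table entirely: it classifies each character arithmetically from its character code (key = 2 + i//3 and presses = i%3+1 for letters A-O, explicit ranges for the irregular PQRS/TUV/WXYZ keys, and a tiny punctuation lookup), instead of A's scan over all button strings with str.find per character.
import Mathlib
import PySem

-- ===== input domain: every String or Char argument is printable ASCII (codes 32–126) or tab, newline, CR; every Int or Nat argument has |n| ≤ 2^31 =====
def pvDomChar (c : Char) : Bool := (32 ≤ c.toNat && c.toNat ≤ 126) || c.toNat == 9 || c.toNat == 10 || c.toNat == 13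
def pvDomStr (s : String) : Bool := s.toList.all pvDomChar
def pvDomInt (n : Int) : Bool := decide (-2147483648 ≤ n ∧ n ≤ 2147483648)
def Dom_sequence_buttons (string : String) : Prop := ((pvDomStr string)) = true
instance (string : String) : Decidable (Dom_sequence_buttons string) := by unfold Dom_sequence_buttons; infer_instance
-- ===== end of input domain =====

-- B classifies each character arithmetically from its code (closed-form key/press-count formulas
-- plus a tiny punctuation lookup) instead of A's per-character scan over all button strings.


-- ===== PORT A =====
-- the buttons dict literal; keys are distinct, so items() iterates exactly this list in order
def pvButtons : List (Int × String) :=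
  [(1, ".,?!:"), (2, "ABC"), (3, "DEF"), (4, "GHI"), (5, "JKL"),
   (6, "MNO"), (7, "PQRS"), (8, "TUV"), (9, "WXYZ"), (0, " ")]

def sequence_buttons (string : String) : String :=
  String.ofList <|
    (PySem.Str.upper string).toList.foldl (fun fin_str ch =>
      pvButtons.foldl (fun fin_str kv =>
        if PySem.Chars.isIn [ch] kv.2.toList then
          fin_str ++ PySem.List.pyRepeat (PySem.Int.toChars kv.1)
            (PySem.Chars.find kv.2.toList [ch] + 1)
        else fin_str) fin_str) []

-- ===== PORT B =====
-- per-character arithmetic classification (Source B's if/elif chain, step for step)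
def pvContribB (ch : Char) : List Char :=
  let o : Int := ch.toNat
  if 65 ≤ o ∧ o ≤ 90 then
    let i := o - 65
    if i < 15 then
      PySem.List.pyRepeat (PySem.Int.toChars (2 + PySem.Int.floordiv i 3)) (PySem.Int.mod i 3 + 1)
    else if i < 19 then PySem.List.pyRepeat ['7'] (i - 14)
    else if i < 22 then PySem.List.pyRepeat ['8'] (i - 18)
    else PySem.List.pyRepeat ['9'] (i - 21)
  else if ch = ' ' then ['0']
  else
    let j := PySem.Chars.find ".,?!:".toList [ch]
    if 0 ≤ j then PySem.List.pyRepeat ['1'] (j + 1) else []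

def sequence_buttons_alt (string : String) : String :=
  String.ofList (((PySem.Str.upper string).toList.map pvContribB).flatten)

-- ===== PRECONDITION & SPEC =====
def Spec_sequence_buttons (string : String) (out : String) : Prop := out = sequence_buttons_alt string
instance (string : String) (out : String) : Decidable (Spec_sequence_buttons string out) := by unfold Spec_sequence_buttons; infer_instance

-- ===== CLAIM (what is proved, stated in full; the proofs are below) =====
def Claim_equal_sequence_buttons : Prop := ∀ (string : String), Dom_sequence_buttons string → Spec_sequence_buttons string (sequence_buttons string)

-- ===== LEMMAS AND PROOFS =====

-- A's contribution for one character of the upper-cased input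
def pvContribA (ch : Char) : List Char :=
  pvButtons.flatMap (fun kv =>
    if PySem.Chars.isIn [ch] kv.2.toList then
      PySem.List.pyRepeat (PySem.Int.toChars kv.1) (PySem.Chars.find kv.2.toList [ch] + 1)
    else [])

-- A's inner loop, rewritten as append of the per-character contribution
theorem pv_inner_eq (ch : Char) (fin_str : List Char) :
    pvButtons.foldl (fun fin_str kv =>
      if PySem.Chars.isIn [ch] kv.2.toList then
        fin_str ++ PySem.List.pyRepeat (PySem.Int.toChars kv.1)
          (PySem.Chars.find kv.2.toList [ch] + 1)
      else fin_str) fin_str = fin_str ++ pvContribA ch := by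
  have h : (fun (fin_str : List Char) (kv : Int × String) =>
      if PySem.Chars.isIn [ch] kv.2.toList then
        fin_str ++ PySem.List.pyRepeat (PySem.Int.toChars kv.1)
          (PySem.Chars.find kv.2.toList [ch] + 1)
      else fin_str) = (fun fin_str kv =>
      fin_str ++ (if PySem.Chars.isIn [ch] kv.2.toList then
        PySem.List.pyRepeat (PySem.Int.toChars kv.1)
          (PySem.Chars.find kv.2.toList [ch] + 1) else [])) := by
    funext a kv; split <;> simp
  rw [h, PySem.List.foldl_append_eq_flatMap]
  rfl

-- per-character agreement, decided for every character code below 127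
set_option maxRecDepth 20000 in
theorem pv_char_eq : ∀ n : Nat, n < 127 →
    pvContribA (Char.ofNat n) = pvContribB (Char.ofNat n) := by decide

-- upperChar keeps the code below 127, decided for every character code below 127
theorem pv_upchar : ∀ n : Nat, n < 127 → (PySem.Chars.upperChar (Char.ofNat n)).toNat < 127 := by decide

-- every character of the upper-cased input of a Dom string has code < 127
theorem pv_upper_lt (s : String) (hD : Dom_sequence_buttons s) :
    ∀ ch ∈ (PySem.Str.upper s).toList, ch.toNat < 127 := by
  intro ch hch
  rw [PySem.Str.toList_upper] at hch
  unfold PySem.Chars.upper at hch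
  rcases List.mem_map.mp hch with ⟨c, hc, rfl⟩
  have hdom : pvDomChar c = true := by
    unfold Dom_sequence_buttons pvDomStr at hD
    exact List.all_eq_true.mp hD c hc
  unfold pvDomChar at hdom
  simp only [Bool.or_eq_true, Bool.and_eq_true, decide_eq_true_eq, beq_iff_eq] at hdom
  have hlt : c.toNat < 127 := by omega
  have := pv_upchar c.toNat hlt
  rwa [Char.ofNat_toNat] at this

-- ===== VERDICT (by name: the statement is the Claim_ definition above) =====
theorem sequence_buttons_spec : Claim_equal_sequence_buttons := by
  intro s hD
  unfold Spec_sequence_buttons sequence_buttons sequence_buttons_alt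
  have h1 : (fun (fin_str : List Char) (ch : Char) =>
      pvButtons.foldl (fun fin_str kv =>
        if PySem.Chars.isIn [ch] kv.2.toList then
          fin_str ++ PySem.List.pyRepeat (PySem.Int.toChars kv.1)
            (PySem.Chars.find kv.2.toList [ch] + 1)
        else fin_str) fin_str) = (fun fin_str ch => fin_str ++ pvContribA ch) := by
    funext a ch; exact pv_inner_eq ch a
  rw [h1, PySem.List.foldl_append_eq_flatMap]
  have h2 : (PySem.Str.upper s).toList.map pvContribA
      = (PySem.Str.upper s).toList.map pvContribB := by
    apply List.map_congr_left
    intro ch hch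
    have hlt := pv_upper_lt s hD ch hch
    have := pv_char_eq ch.toNat hlt
    rwa [Char.ofNat_toNat] at this
  simp only [List.flatMap_def, h2, List.nil_append]
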